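-- pv_equiv track=rewrite | github.com/aurora-mm/CAMusic | rule190.py | row_to_int_anchor_rightmost
-- ===== SOURCE A (Python) =====
-- from typing import Optional, Iterable, Union, List, Tuple, Set
--
-- def row_to_int_anchor_rightmost(row: List[int]) -> int:
--     """
--     Interpret the finite 0/1 row by anchoring the RIGHTMOST 1 to bit 0
--     and packing bits leftward.
--     """
--     # find rightmost 1
--     idx = -1
--     for i in range(len(row) - 1, -1, -1):
--         if row[i]:
--             idx = i
--             break
--     if idx == -1:
--         return 0
--     x = 0
--     bit = 0
--     for k in range(idx, -1, -1):
--         if row[k]: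
--             x |= 1 << bit
--         bit += 1
--     return x
-- ===== SOURCE B (Python) =====
-- from typing import List
--
-- def row_to_int_anchor_rightmost(row: List[int]) -> int:
--     # Pack the whole row MSB-first in one forward pass, then strip the
--     # trailing zero bits (positions right of the rightmost 1).
--     full = 0
--     for b in row:
--         full = full * 2 + (1 if b else 0)
--     while full and full % 2 == 0:
--         full //= 2
--     return full
-- ===== Notes on version B (the rewrite author's own statement) =====
-- stated objective: simpler
-- what changed: Replaces the reverse search for the rightmost 1 plus a second reversed bit-setting loop by a single forward Horner pack of the whole row followed by stripping trailing zero bits.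
import Mathlib
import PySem

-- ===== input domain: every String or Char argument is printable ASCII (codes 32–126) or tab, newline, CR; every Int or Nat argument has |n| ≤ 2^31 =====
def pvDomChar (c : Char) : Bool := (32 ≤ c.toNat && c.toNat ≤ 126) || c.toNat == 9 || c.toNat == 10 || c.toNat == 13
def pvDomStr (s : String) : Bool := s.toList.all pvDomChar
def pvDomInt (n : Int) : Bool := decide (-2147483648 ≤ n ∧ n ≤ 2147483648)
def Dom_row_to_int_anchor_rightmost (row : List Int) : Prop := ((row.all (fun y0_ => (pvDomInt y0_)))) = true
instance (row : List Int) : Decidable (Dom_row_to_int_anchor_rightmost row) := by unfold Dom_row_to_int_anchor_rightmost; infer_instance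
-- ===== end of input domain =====

-- B replaces A's reverse search for the rightmost 1 plus a second reversed bit-setting loop
-- by a single forward Horner pack of the whole row followed by stripping trailing zero bits (simpler).


-- ===== PORT A =====
-- "for i in range(len(row)-1,-1,-1): if row[i]: idx = i; break" — recursion on the countdown
-- counter n: step n+1 inspects index n.  row[i] for 0 ≤ i < len(row) is row.getD i 0 (exact
-- on the in-range indices this loop uses); truthiness of an int is ≠ 0.
def aFindIdx (row : List Int) : Nat → Int
  | 0 => -1
  | n + 1 => if row.getD n 0 ≠ 0 then (n : Int) else aFindIdx row n

-- "for k in range(idx, -1, -1): if row[k]: x |= 1 << bit; bit += 1" — recursion on the fuel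
-- k+1 (step fuel+1 has k = fuel); x stays a nonnegative Python int, so |= and << are exactly
-- Nat.lor and Nat.shiftLeft.
def aLoop (row : List Int) : Nat → Nat → Nat → Nat
  | 0, x, _ => x
  | k + 1, x, bit => aLoop row k (if row.getD k 0 ≠ 0 then x ||| (1 <<< bit) else x) (bit + 1)

def row_to_int_anchor_rightmost (row : List Int) : Int :=
  let idx := aFindIdx row row.length
  if idx = -1 then 0
  else (aLoop row (idx.toNat + 1) 0 0 : Int)

-- ===== PORT B =====
-- "full = full * 2 + (1 if b else 0)" forward over the row; full starts at 0 and the step keeps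
-- it nonnegative, so it is tracked as Nat (exact for this Python int).
def bPack (row : List Int) : Nat :=
  row.foldl (fun full b => full * 2 + (if b ≠ 0 then 1 else 0)) 0

-- "while full and full % 2 == 0: full //= 2" — for Nat, // 2 is / 2.
def bStrip (n : Nat) : Nat :=
  if h : n ≠ 0 ∧ n % 2 = 0 then bStrip (n / 2) else n
decreasing_by omega

def row_to_int_anchor_rightmost_alt (row : List Int) : Int :=
  (bStrip (bPack row) : Int)

-- ===== PRECONDITION & SPEC =====
def Spec_row_to_int_anchor_rightmost (row : List Int) (out : Int) : Prop := out = row_to_int_anchor_rightmost_alt row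
instance (row : List Int) (out : Int) : Decidable (Spec_row_to_int_anchor_rightmost row out) := by unfold Spec_row_to_int_anchor_rightmost; infer_instance

-- ===== CLAIM (what is proved, stated in full; the proofs are below) =====
def Claim_equal_row_to_int_anchor_rightmost : Prop := ∀ (row : List Int), Dom_row_to_int_anchor_rightmost row → Spec_row_to_int_anchor_rightmost row (row_to_int_anchor_rightmost row)

-- ===== LEMMAS AND PROOFS =====

theorem lor_pow_eq_add (b x : Nat) (h : x < 2 ^ b) : x ||| 2 ^ b = x + 2 ^ b := by
  induction b generalizing x with
  | zero => interval_cases x; decide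
  | succ b ih =>
    have h2 : x / 2 < 2 ^ b := by
      have := Nat.pow_succ 2 b; omega
    have key := ih (x / 2) h2
    have step : x ||| 2 ^ (b + 1) = 2 * (x / 2 ||| 2 ^ b) + x % 2 := by
      have hb : (2 : Nat) ^ (b + 1) = Nat.bit false (2 ^ b) := by
        simp [Nat.bit, Nat.pow_succ]; ring
      have hxx : x = Nat.bit (x % 2 = 1) (x / 2) := by
        simp [Nat.bit]
        rcases Nat.mod_two_eq_zero_or_one x with hm | hm <;> simp [hm] <;> omega
      rw [hb]; conv_lhs => rw [hxx]
      rw [Nat.lor_bit]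
      simp [Nat.bit]
      rcases Nat.mod_two_eq_zero_or_one x with hm | hm <;> simp [hm]
    rw [step, key, Nat.pow_succ]; omega

theorem bPack_foldl (l : List Int) (x : Nat) :
    l.foldl (fun full b => full * 2 + (if b ≠ 0 then 1 else 0)) x
      = x * 2 ^ l.length + bPack l := by
  induction l generalizing x with
  | nil => simp [bPack]
  | cons a t ih =>
    simp only [List.foldl_cons, List.length_cons, bPack]
    rw [ih, ih ((0 : Nat) * 2 + (if a ≠ 0 then 1 else 0))]
    ring

theorem bPack_append (l1 l2 : List Int) :
    bPack (l1 ++ l2) = bPack l1 * 2 ^ l2.length + bPack l2 := by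
  unfold bPack
  rw [List.foldl_append]
  exact bPack_foldl l2 _

theorem bPack_zeros (l : List Int) (h : ∀ a ∈ l, a = 0) : bPack l = 0 := by
  induction l with
  | nil => simp [bPack]
  | cons a t ih =>
    have ha : a = 0 := h a (by simp)
    have ht := ih (fun b hb => h b (by simp [hb]))
    have hc : bPack (a :: t) = bPack ([a] ++ t) := by simp
    rw [hc, bPack_append, ht]
    simp [bPack, ha]

theorem bPack_take_succ (row : List Int) (k : Nat) (hk : k < row.length) :
    bPack (row.take (k + 1)) = bPack (row.take k) * 2 + (if row.getD k 0 ≠ 0 then 1 else 0) := by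
  rw [List.take_add_one]
  have : row[k]? = some row[k] := List.getElem?_eq_getElem hk
  rw [this]
  have hgd : row.getD k 0 = row[k] := List.getD_eq_getElem row 0 hk
  rw [bPack_append, hgd]
  simp [bPack]

theorem bStrip_zero : bStrip 0 = 0 := by rw [bStrip]; simp

theorem bStrip_two_mul (m : Nat) : bStrip (2 * m) = bStrip m := by
  rcases Nat.eq_zero_or_pos m with rfl | hm
  · simp
  · rw [bStrip]
    have hcond : (2 * m ≠ 0 ∧ 2 * m % 2 = 0) := by omega
    rw [dif_pos hcond]
    congr 1
    omega

theorem bStrip_pow_mul (v m : Nat) : bStrip (v * 2 ^ m) = bStrip v := by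
  induction m with
  | zero => simp
  | succ m ih =>
    have : v * 2 ^ (m + 1) = 2 * (v * 2 ^ m) := by ring
    rw [this, bStrip_two_mul, ih]

theorem bStrip_odd (v : Nat) (h : v % 2 = 1) : bStrip v = v := by
  rw [bStrip]
  have : ¬ (v ≠ 0 ∧ v % 2 = 0) := by omega
  simp [this]

theorem aFindIdx_neg (row : List Int) (n : Nat) (h : aFindIdx row n = -1) :
    ∀ i < n, row.getD i 0 = 0 := by
  induction n with
  | zero => intro i hi; omega
  | succ n ih =>
    intro i hi
    rw [aFindIdx] at h
    by_cases hz : row.getD n 0 ≠ 0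
    · rw [if_pos hz] at h; exact absurd h (by omega)
    · rw [if_neg hz] at h
      have hz' := not_ne_iff.mp hz
      rcases Nat.lt_succ_iff_lt_or_eq.mp hi with hlt | rfl
      · exact ih h i hlt
      · exact hz'

theorem aFindIdx_pos (row : List Int) (n : Nat) (h : aFindIdx row n ≠ -1) :
    ∃ j : Nat, aFindIdx row n = (j : Int) ∧ j < n ∧ row.getD j 0 ≠ 0 ∧
      ∀ i, j < i → i < n → row.getD i 0 = 0 := by
  induction n with
  | zero => simp [aFindIdx] at h
  | succ n ih =>
    rw [aFindIdx] at h ⊢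
    by_cases hz : row.getD n 0 ≠ 0
    · rw [if_pos hz] at h ⊢
      refine ⟨n, rfl, by omega, hz, ?_⟩
      intro i hi1 hi2; omega
    · rw [if_neg hz] at h ⊢
      obtain ⟨j, hj1, hj2, hj3, hj4⟩ := ih h
      have hz' := not_ne_iff.mp hz
      refine ⟨j, hj1, by omega, hj3, ?_⟩
      intro i hi1 hi2
      rcases Nat.lt_succ_iff_lt_or_eq.mp hi2 with hlt | rfl
      · exact hj4 i hi1 hlt
      · exact hz'

theorem aLoop_eq (row : List Int) (fuel : Nat) (hf : fuel ≤ row.length) :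
    ∀ x bit : Nat, x < 2 ^ bit →
      aLoop row fuel x bit = x + 2 ^ bit * bPack (row.take fuel) := by
  induction fuel with
  | zero => intro x bit _; simp [aLoop, bPack]
  | succ k ih =>
    intro x bit hx
    rw [aLoop]
    have hk : k < row.length := by omega
    have hx' : (if row.getD k 0 ≠ 0 then x ||| (1 <<< bit) else x) < 2 ^ (bit + 1) := by
      split
      · rw [Nat.one_shiftLeft, lor_pow_eq_add bit x hx, Nat.pow_succ]; omega
      · have : (2:Nat) ^ bit ≤ 2 ^ (bit + 1) := Nat.pow_le_pow_right (by omega) (by omega)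
        omega
    rw [ih (by omega) _ (bit + 1) hx', bPack_take_succ row k hk]
    split
    · rw [Nat.one_shiftLeft, lor_pow_eq_add bit x hx, Nat.pow_succ]; ring
    · rw [Nat.pow_succ]; ring

-- ===== VERDICT (by name: the statement is the Claim_ definition above) =====
theorem row_to_int_anchor_rightmost_spec : Claim_equal_row_to_int_anchor_rightmost := by
  intro row _
  unfold Spec_row_to_int_anchor_rightmost row_to_int_anchor_rightmost row_to_int_anchor_rightmost_alt
  by_cases h : aFindIdx row row.length = -1
  · -- every entry is 0: both sides are 0
    have hall : ∀ a ∈ row, a = 0 := by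
      intro a ha
      obtain ⟨i, hi, rfl⟩ := List.getElem_of_mem ha
      have := aFindIdx_neg row row.length h i hi
      rwa [List.getD_eq_getElem row 0 hi] at this
    simp [h, bPack_zeros row hall, bStrip_zero]
  · obtain ⟨j, hj1, hj2, hj3, hj4⟩ := aFindIdx_pos row row.length h
    simp only [hj1]
    rw [if_neg (by omega : ¬ (j : Int) = -1)]
    have htoNat : ((j : Int)).toNat = j := Int.toNat_natCast j
    have hA : aLoop row (j + 1) 0 0 = bPack (row.take (j + 1)) := by
      have := aLoop_eq row (j + 1) (by omega) 0 0 (by norm_num)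
      simpa using this
    -- B's pack = A's value times a power of two, and A's value is odd
    have hsplit : row = row.take (j + 1) ++ row.drop (j + 1) := (List.take_append_drop _ _).symm
    have hdrop : ∀ a ∈ row.drop (j + 1), a = 0 := by
      intro a ha
      obtain ⟨i, hi, rfl⟩ := List.getElem_of_mem ha
      rw [List.getElem_drop]
      have hlen : j + 1 + i < row.length := by
        have := List.length_drop (l := row) (i := j + 1); omega
      have := hj4 (j + 1 + i) (by omega) hlen
      rwa [List.getD_eq_getElem row 0 hlen] at this
    have hpack : bPack row = bPack (row.take (j + 1)) * 2 ^ (row.drop (j + 1)).length := by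
      conv_lhs => rw [hsplit]
      rw [bPack_append, bPack_zeros _ hdrop]
      simp
    have hodd : bPack (row.take (j + 1)) % 2 = 1 := by
      rw [bPack_take_succ row j hj2, if_pos hj3]
      omega
    rw [htoNat, hA, hpack, bStrip_pow_mul, bStrip_odd _ hodd]
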